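-- pv_equiv track=rewrite | github.com/simal24k/AI-Fundamentals | lab7-8/Q3.py | minimax_path
-- ===== SOURCE A (Python) =====
-- def minimax_path(tree, node, maximising):
--     children = tree.get(node, [])
--     if not children:
--         return node, [node]
--
--     results = [(minimax_path(tree, ch, not maximising), ch)
--                for ch in children]
--
--     if maximising:
--         (score, sub_path), chosen = max(results, key=lambda r: r[0][0])
--     else:
--         (score, sub_path), chosen = min(results, key=lambda r: r[0][0])
--
--     return score, [node] + sub_path
-- ===== SOURCE B (Python) =====
-- def minimax_path(tree, node, maximising):
--     # Two-pass decomposition: a pure minimax *value* recursion, then a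
--     # separate path reconstruction that descends to the first child whose
--     # value equals the parent's value.
--     def value(n, mx):
--         cs = tree.get(n, [])
--         if not cs:
--             return n
--         vs = [value(c, not mx) for c in cs]
--         return max(vs) if mx else min(vs)
--
--     def path(n, mx):
--         cs = tree.get(n, [])
--         if not cs:
--             return [n]
--         tv = value(n, mx)
--         for c in cs:
--             if value(c, not mx) == tv:
--                 return [n] + path(c, not mx)
--
--     return value(node, maximising), path(node, maximising)
-- ===== Notes on version B (the rewrite author's own statement) =====
-- stated objective: alternative
-- what changed: A's single fused recursion returning (score, path) pairs and taking max/min over pairs is split into a pure minimax value recursion plus a separate path-reconstruction recursion that descends to the first child whose value equals the parent's value.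
import Mathlib
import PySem

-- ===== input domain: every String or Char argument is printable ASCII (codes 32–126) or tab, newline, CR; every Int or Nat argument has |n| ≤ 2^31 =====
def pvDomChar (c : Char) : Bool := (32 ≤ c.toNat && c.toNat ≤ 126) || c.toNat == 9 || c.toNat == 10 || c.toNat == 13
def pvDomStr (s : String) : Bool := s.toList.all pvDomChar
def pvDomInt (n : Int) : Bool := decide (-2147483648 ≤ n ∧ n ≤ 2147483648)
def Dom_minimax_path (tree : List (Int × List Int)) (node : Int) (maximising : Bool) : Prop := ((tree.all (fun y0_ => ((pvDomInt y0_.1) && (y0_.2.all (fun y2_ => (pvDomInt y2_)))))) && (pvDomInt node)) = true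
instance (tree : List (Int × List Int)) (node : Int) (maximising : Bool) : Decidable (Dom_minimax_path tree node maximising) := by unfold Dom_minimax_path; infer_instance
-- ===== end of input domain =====

-- B splits A's fused minimax recursion (which returns (score, path) pairs and takes
-- max/min over pairs) into a pure value recursion plus a separate path reconstruction
-- that descends to the first child whose value equals the parent's; same return values.

-- ===== PORT A =====
-- fuel plumbing shared by both ports: a Python list comprehension of recursive
-- calls, sequenced through Option (none = some call ran out of fuel)
def optMap {α β : Type} (f : α → Option β) : List α → Option (List β)
  | [] => some []
  | x :: xs =>
    match f x, optMap f xs with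
    | some y, some ys => some (y :: ys)
    | _, _ => none

-- literal port of A's recursion, with fuel (Python recursion diverges on cycles)
def mmA (tree : List (Int × List Int)) : Nat → Int → Bool → Option (Int × List Int)
  | 0, _, _ => none
  | f+1, node, mx =>
    let children := (PySem.Dict.mk tree).getD node []
    if children = [] then some (node, [node])
    else
      match optMap (fun ch => (mmA tree f ch (!mx)).map (fun r => (r, ch))) children with
      | none => none
      | some results =>
        match (if mx then PySem.List.max? results (fun r => r.1.1)
               else PySem.List.min? results (fun r => r.1.1)) with
        | none => none
        | some ((score, subPath), _chosen) => some (score, node :: subPath)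

def minimax_path (tree : List (Int × List Int)) (node : Int) (maximising : Bool) : Int × List Int :=
  (mmA tree (tree.length + 1) node maximising).getD (0, [])

-- ===== PORT B =====
-- B's `value`: pure minimax value of a node (no path)
def valB (tree : List (Int × List Int)) : Nat → Int → Bool → Option Int
  | 0, _, _ => none
  | f+1, n, mx =>
    let cs := (PySem.Dict.mk tree).getD n []
    if cs = [] then some n
    else
      match optMap (fun c => valB tree f c (!mx)) cs with
      | none => none
      | some vs =>
        if mx then PySem.List.max? vs (fun v => v) else PySem.List.min? vs (fun v => v)

-- B's `path`: descend to the first child whose value equals the parent's value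
def pathB (tree : List (Int × List Int)) : Nat → Int → Bool → Option (List Int)
  | 0, _, _ => none
  | f+1, n, mx =>
    let cs := (PySem.Dict.mk tree).getD n []
    if cs = [] then some [n]
    else
      match valB tree (f+1) n mx with
      | none => none
      | some tv =>
        match cs.find? (fun c => valB tree f c (!mx) == some tv) with
        | none => none
        | some c => (pathB tree f c (!mx)).map (fun rest => n :: rest)

def minimax_path_alt (tree : List (Int × List Int)) (node : Int) (maximising : Bool) : Int × List Int :=
  match valB tree (tree.length + 1) node maximising,
        pathB tree (tree.length + 1) node maximising with
  | some v, some p => (v, p)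
  | _, _ => (0, [])

-- ===== PRECONDITION & SPEC =====
-- one step of graph expansion: the (deduplicated) children of a set of nodes
def stepKids (tree : List (Int × List Int)) (ns : List Int) : List Int :=
  PySem.Set.ofList (ns.flatMap (fun n => (PySem.Dict.mk tree).getD n []))

def pvFrontier (tree : List (Int × List Int)) : Nat → List Int → List Int
  | 0, ns => ns
  | f+1, ns => pvFrontier tree f (stepKids tree ns)

-- Pre_ excludes exactly the inputs on which a cycle is reachable from `node`, where
-- Python A raises RecursionError: every child-chain from `node` must die out within
-- |tree|+1 steps, which holds for every acyclic-from-`node` input and fails iff a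
-- reachable cycle makes A's recursion (and B's) infinite.
def Pre_minimax_path (tree : List (Int × List Int)) (node : Int) (maximising : Bool) : Prop :=
  pvFrontier tree (tree.length + 1) [node] = []

instance (tree : List (Int × List Int)) (node : Int) (maximising : Bool) : Decidable (Pre_minimax_path tree node maximising) := by unfold Pre_minimax_path; infer_instance

def pvWitness_minimax_path : (List (Int × List Int)) × Int × Bool := ([(1, [2, 3]), (2, []), (3, [7, 7])], 1, true)

def Spec_minimax_path (tree : List (Int × List Int)) (node : Int) (maximising : Bool) (out : Int × List Int) : Prop := out = minimax_path_alt tree node maximising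
instance (tree : List (Int × List Int)) (node : Int) (maximising : Bool) (out : Int × List Int) : Decidable (Spec_minimax_path tree node maximising out) := by unfold Spec_minimax_path; infer_instance

-- ===== CLAIM (what is proved, stated in full; the proofs are below) =====
def Claim_equal_minimax_path : Prop := ∀ (tree : List (Int × List Int)) (node : Int) (maximising : Bool), Dom_minimax_path tree node maximising → Pre_minimax_path tree node maximising → Spec_minimax_path tree node maximising (minimax_path tree node maximising)

-- ===== LEMMAS AND PROOFS =====

theorem optMap_pair {α β : Type} (F : α → Option β) :
    ∀ (cs : List α) (rs : List (β × α)),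
      optMap (fun ch => (F ch).map (fun r => (r, ch))) cs = some rs →
      cs = rs.map (·.2) ∧ ∀ r ∈ rs, F r.2 = some r.1 := by
  intro cs
  induction cs with
  | nil => intro rs h; simp [optMap] at h; subst h; simp
  | cons c ct ih =>
    intro rs h
    simp only [optMap] at h
    cases hc : F c with
    | none => rw [hc] at h; simp at h
    | some y =>
      rw [hc] at h
      cases hrest : optMap (fun ch => (F ch).map (fun r => (r, ch))) ct with
      | none => rw [hrest] at h; simp at h
      | some ys =>
        rw [hrest] at h
        simp at h
        subst h
        obtain ⟨h1, h2⟩ := ih ys hrest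
        constructor
        · simp [← h1]
        · intro r hr
          rw [List.mem_cons] at hr
          rcases hr with hr | hr
          · subst hr; exact hc
          · exact h2 r hr

theorem optMap_of_map {α β : Type} (f : α → Option β) (g : α → β) :
    ∀ l : List α, (∀ x ∈ l, f x = some (g x)) → optMap f l = some (l.map g) := by
  intro l
  induction l with
  | nil => intro _; simp [optMap]
  | cons x xs ih =>
    intro h
    simp only [optMap, h x (by simp), ih (fun y hy => h y (by simp [hy])), List.map]

theorem optMap_map {α β γ : Type} (f : β → Option γ) (h : α → β) :
    ∀ l : List α, optMap f (l.map h) = optMap (fun x => f (h x)) l := by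
  intro l
  induction l with
  | nil => simp [optMap]
  | cons x xs ih => simp only [List.map, optMap, ih]

theorem optMap_none_iff {α β : Type} (f : α → Option β) :
    ∀ l : List α, optMap f l = none ↔ ∃ x ∈ l, f x = none := by
  intro l
  induction l with
  | nil => simp [optMap]
  | cons x xs ih =>
    simp only [optMap]
    cases hx : f x with
    | none => simp [hx]
    | some y =>
      cases hxs : optMap f xs with
      | none =>
        simp only [List.mem_cons]
        constructor
        · intro _
          obtain ⟨z, hz, hfz⟩ := (ih).mp hxs
          exact ⟨z, Or.inr hz, hfz⟩
        · intro _; trivial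
      | some ys =>
        simp only [List.mem_cons]
        constructor
        · intro h; exact absurd h (by simp)
        · rintro ⟨z, hz | hz, hfz⟩
          · rw [hz, hx] at hfz; exact absurd hfz (by simp)
          · exact absurd ((ih).mpr ⟨z, hz, hfz⟩) (by simp [hxs])

theorem optMap_cons_ne_nil {α β : Type} (f : α → Option β) (x : α) (xs : List α) :
    optMap f (x :: xs) ≠ some [] := by
  simp only [optMap]
  cases hx : f x
  · simp
  · cases hxs : optMap f xs <;> simp

theorem find?_congr_mem {α : Type} {p q : α → Bool} :
    ∀ l : List α, (∀ x ∈ l, p x = q x) → l.find? p = l.find? q := by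
  intro l
  induction l with
  | nil => intro _; rfl
  | cons x xs ih =>
    intro h
    simp only [List.find?, h x (by simp)]
    cases q x
    · exact ih (fun y hy => h y (by simp [hy]))
    · rfl

-- Python's max(.., key) / min(.., key) as a running fold from the head (first tie wins)
def pfMax {α : Type} (k : α → Int) (a : α) (as : List α) : α :=
  as.foldl (fun m x => if k m < k x then x else m) a

def pfMin {α : Type} (k : α → Int) (a : α) (as : List α) : α :=
  as.foldl (fun m x => if k x < k m then x else m) a

theorem max?_cons_pf {α : Type} (k : α → Int) (a : α) (as : List α) :
    PySem.List.max? (a :: as) k = some (pfMax k a as) := by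
  suffices h : ∀ (as : List α) (a : α),
      List.foldl (fun acc x => match acc with
        | none => some x
        | some m => if k m < k x then some x else some m) (some a) as = some (pfMax k a as) by
    simpa [PySem.List.max?] using h as a
  intro as
  induction as with
  | nil => intro a; simp [pfMax]
  | cons x xs ih =>
    intro a
    simp only [List.foldl, pfMax]
    rw [show (if k a < k x then some x else some a) = some (if k a < k x then x else a) by split <;> rfl]
    exact ih _

theorem min?_cons_pf {α : Type} (k : α → Int) (a : α) (as : List α) :
    PySem.List.min? (a :: as) k = some (pfMin k a as) := by
  suffices h : ∀ (as : List α) (a : α),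
      List.foldl (fun acc x => match acc with
        | none => some x
        | some m => if k x < k m then some x else some m) (some a) as = some (pfMin k a as) by
    simpa [PySem.List.min?] using h as a
  intro as
  induction as with
  | nil => intro a; simp [pfMin]
  | cons x xs ih =>
    intro a
    simp only [List.foldl, pfMin]
    rw [show (if k x < k a then some x else some a) = some (if k x < k a then x else a) by split <;> rfl]
    exact ih _

theorem coreMax {α : Type} (k : α → Int) :
    ∀ (as : List α) (a : α),
      k (pfMax k a as) = (as.map k).foldl max (k a)
      ∧ (a :: as).find? (fun x => k x == (as.map k).foldl max (k a)) = some (pfMax k a as) := by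
  intro as
  induction as with
  | nil =>
    intro a
    constructor
    · simp [pfMax]
    · simp [pfMax, List.find?]
  | cons x xs ih =>
    intro a
    by_cases h : k a < k x
    · have hmax : max (k a) (k x) = k x := by omega
      have hpf : pfMax k a (x :: xs) = pfMax k x xs := by simp [pfMax, List.foldl, h]
      obtain ⟨ih1, ih2⟩ := ih x
      have hM : ((x :: xs).map k).foldl max (k a) = (xs.map k).foldl max (k x) := by
        simp [List.foldl, hmax]
      have hlt : k a < (xs.map k).foldl max (k x) :=
        lt_of_lt_of_le h (PySem.List.le_foldl_max (xs.map k) (k x)).1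
      constructor
      · rw [hpf, hM]; exact ih1
      · rw [hM, hpf]
        rw [List.find?_cons_of_neg (p := fun y => k y == (xs.map k).foldl max (k x))
          (by simp only [beq_iff_eq]; omega)]
        exact ih2
    · have hmax : max (k a) (k x) = k a := by omega
      have hpf : pfMax k a (x :: xs) = pfMax k a xs := by simp [pfMax, List.foldl, h]
      obtain ⟨ih1, ih2⟩ := ih a
      have hM : ((x :: xs).map k).foldl max (k a) = (xs.map k).foldl max (k a) := by
        simp [List.foldl, hmax]
      have hle : k a ≤ (xs.map k).foldl max (k a) := (PySem.List.le_foldl_max (xs.map k) (k a)).1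
      constructor
      · rw [hpf, hM]; exact ih1
      · rw [hM, hpf]
        by_cases heq : k a = (xs.map k).foldl max (k a)
        · rw [List.find?_cons_of_pos (p := fun y => k y == (xs.map k).foldl max (k a))
            (by simp only [beq_iff_eq]; exact heq)]
          rw [List.find?_cons_of_pos (p := fun y => k y == (xs.map k).foldl max (k a))
            (by simp only [beq_iff_eq]; exact heq)] at ih2
          exact ih2
        · rw [List.find?_cons_of_neg (p := fun y => k y == (xs.map k).foldl max (k a))
            (by simp only [beq_iff_eq]; exact heq)] at ih2
          rw [List.find?_cons_of_neg (p := fun y => k y == (xs.map k).foldl max (k a))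
              (by simp only [beq_iff_eq]; exact heq),
              List.find?_cons_of_neg (p := fun y => k y == (xs.map k).foldl max (k a))
              (by simp only [beq_iff_eq]; omega)]
          exact ih2

theorem coreMin {α : Type} (k : α → Int) :
    ∀ (as : List α) (a : α),
      k (pfMin k a as) = (as.map k).foldl min (k a)
      ∧ (a :: as).find? (fun x => k x == (as.map k).foldl min (k a)) = some (pfMin k a as) := by
  intro as
  induction as with
  | nil =>
    intro a
    constructor
    · simp [pfMin]
    · simp [pfMin, List.find?]
  | cons x xs ih =>
    intro a
    by_cases h : k x < k a
    · have hmin : min (k a) (k x) = k x := by omega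
      have hpf : pfMin k a (x :: xs) = pfMin k x xs := by simp [pfMin, List.foldl, h]
      obtain ⟨ih1, ih2⟩ := ih x
      have hM : ((x :: xs).map k).foldl min (k a) = (xs.map k).foldl min (k x) := by
        simp [List.foldl, hmin]
      have hlt : (xs.map k).foldl min (k x) < k a :=
        lt_of_le_of_lt (PySem.List.foldl_min_le (xs.map k) (k x)).1 h
      constructor
      · rw [hpf, hM]; exact ih1
      · rw [hM, hpf]
        rw [List.find?_cons_of_neg (p := fun y => k y == (xs.map k).foldl min (k x))
          (by simp only [beq_iff_eq]; omega)]
        exact ih2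
    · have hmin : min (k a) (k x) = k a := by omega
      have hpf : pfMin k a (x :: xs) = pfMin k a xs := by simp [pfMin, List.foldl, h]
      obtain ⟨ih1, ih2⟩ := ih a
      have hM : ((x :: xs).map k).foldl min (k a) = (xs.map k).foldl min (k a) := by
        simp [List.foldl, hmin]
      have hle : (xs.map k).foldl min (k a) ≤ k a := (PySem.List.foldl_min_le (xs.map k) (k a)).1
      constructor
      · rw [hpf, hM]; exact ih1
      · rw [hM, hpf]
        by_cases heq : k a = (xs.map k).foldl min (k a)
        · rw [List.find?_cons_of_pos (p := fun y => k y == (xs.map k).foldl min (k a))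
            (by simp only [beq_iff_eq]; exact heq)]
          rw [List.find?_cons_of_pos (p := fun y => k y == (xs.map k).foldl min (k a))
            (by simp only [beq_iff_eq]; exact heq)] at ih2
          exact ih2
        · rw [List.find?_cons_of_neg (p := fun y => k y == (xs.map k).foldl min (k a))
            (by simp only [beq_iff_eq]; exact heq)] at ih2
          rw [List.find?_cons_of_neg (p := fun y => k y == (xs.map k).foldl min (k a))
              (by simp only [beq_iff_eq]; exact heq),
              List.find?_cons_of_neg (p := fun y => k y == (xs.map k).foldl min (k a))
              (by simp only [beq_iff_eq]; omega)]
          exact ih2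

-- A's result determines B's value and B's path, fuel for fuel
theorem AtoB (tree : List (Int × List Int)) :
    ∀ (f : Nat) (n : Int) (mx : Bool) (v : Int) (p : List Int),
      mmA tree f n mx = some (v, p) → valB tree f n mx = some v ∧ pathB tree f n mx = some p := by
  intro f
  induction f with
  | zero => intro n mx v p h; simp [mmA] at h
  | succ f ih =>
    intro n mx v p h
    rw [mmA] at h
    by_cases hcs : (PySem.Dict.mk tree).getD n [] = []
    · rw [if_pos hcs] at h
      injection h with h'
      obtain ⟨rfl, rfl⟩ := Prod.mk.injEq .. ▸ Prod.ext_iff.mp h'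
      constructor
      · rw [valB, if_pos hcs]
      · rw [pathB, if_pos hcs]
    · rw [if_neg hcs] at h
      cases hopt : optMap (fun ch => (mmA tree f ch (!mx)).map (fun r => (r, ch)))
          ((PySem.Dict.mk tree).getD n []) with
      | none => rw [hopt] at h; simp at h
      | some rs =>
        rw [hopt] at h
        obtain ⟨hcs_eq, hF⟩ := optMap_pair (fun ch => mmA tree f ch (!mx)) _ rs hopt
        have hIH : ∀ r ∈ rs, valB tree f r.2 (!mx) = some r.1.1 ∧ pathB tree f r.2 (!mx) = some r.1.2 := by
          intro r hr
          have := ih r.2 (!mx) r.1.1 r.1.2 (by rw [hF r hr])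
          exact this
        cases rs with
        | nil => simp [hcs_eq] at hcs
        | cons r0 rt =>
          have hvs : optMap (fun c => valB tree f c (!mx)) ((PySem.Dict.mk tree).getD n []) =
              some ((r0 :: rt).map (fun r => r.1.1)) := by
            rw [hcs_eq, optMap_map]
            exact optMap_of_map _ _ _ (fun r hr => (hIH r hr).1)
          cases mx with
          | true =>
            dsimp only at h
            rw [max?_cons_pf] at h
            set best := pfMax (fun (r : (Int × List Int) × Int) => r.1.1) r0 rt with hbest
            have h2 : some (best.1.1, n :: best.1.2) = some (v, p) := h
            rw [Option.some.injEq, Prod.mk.injEq] at h2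
            obtain ⟨hv, hp⟩ := h2
            set M := ((rt.map (fun r => r.1.1)).foldl max r0.1.1) with hM
            obtain ⟨hc1, hc2⟩ := coreMax (fun (r : (Int × List Int) × Int) => r.1.1) rt r0
            have hvM : v = M := by
              rw [← hv]
              simpa [List.map_map] using hc1
            have hvalB : valB tree (f+1) n true = some v := by
              rw [valB, if_neg hcs, hvs]
              simp only [List.map, if_pos rfl]
              rw [PySem.List.max?_id_cons]
              rw [hvM]
              try simp [hM, List.map_map]
            refine ⟨hvalB, ?_⟩
            rw [pathB, if_neg hcs, hvalB]
            dsimp only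
            have hfind : ((PySem.Dict.mk tree).getD n []).find?
                (fun c => valB tree f c (!true) == some v) = some best.2 := by
              rw [hcs_eq, List.find?_map]
              have hcongr : (r0 :: rt).find? (fun r => valB tree f r.2 (!true) == some v) =
                  (r0 :: rt).find? (fun r => r.1.1 == M) := by
                apply find?_congr_mem
                intro r hr
                rw [(hIH r hr).1, hvM]
                simp
              rw [show ((fun c => valB tree f c (!true) == some v) ∘ (fun (r : (Int × List Int) × Int) => r.2)) = (fun r => valB tree f r.2 (!true) == some v) from rfl]
              rw [hcongr]
              have : (r0 :: rt).find? (fun r => r.1.1 == M) = some best := by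
                simpa [List.map_map] using hc2
              rw [this]
              rfl
            rw [hfind]
            dsimp only
            have hbest_mem : best ∈ r0 :: rt :=
              PySem.List.max?_mem (max?_cons_pf (fun (r : (Int × List Int) × Int) => r.1.1) r0 rt)
            rw [(hIH best hbest_mem).2]
            simp [← hp]
          | false =>
            dsimp only at h
            rw [min?_cons_pf] at h
            set best := pfMin (fun (r : (Int × List Int) × Int) => r.1.1) r0 rt with hbest
            have h2 : some (best.1.1, n :: best.1.2) = some (v, p) := h
            rw [Option.some.injEq, Prod.mk.injEq] at h2
            obtain ⟨hv, hp⟩ := h2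
            set M := ((rt.map (fun r => r.1.1)).foldl min r0.1.1) with hM
            obtain ⟨hc1, hc2⟩ := coreMin (fun (r : (Int × List Int) × Int) => r.1.1) rt r0
            have hvM : v = M := by
              rw [← hv]
              simpa [List.map_map] using hc1
            have hvalB : valB tree (f+1) n false = some v := by
              rw [valB, if_neg hcs, hvs]
              simp only [List.map, if_neg (by simp : ¬ false = true)]
              rw [PySem.List.min?_id_cons]
              rw [hvM]
              try simp [hM, List.map_map]
            refine ⟨hvalB, ?_⟩
            rw [pathB, if_neg hcs, hvalB]
            dsimp only
            have hfind : ((PySem.Dict.mk tree).getD n []).find?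
                (fun c => valB tree f c (!false) == some v) = some best.2 := by
              rw [hcs_eq, List.find?_map]
              have hcongr : (r0 :: rt).find? (fun r => valB tree f r.2 (!false) == some v) =
                  (r0 :: rt).find? (fun r => r.1.1 == M) := by
                apply find?_congr_mem
                intro r hr
                rw [(hIH r hr).1, hvM]
                simp
              rw [show ((fun c => valB tree f c (!false) == some v) ∘ (fun (r : (Int × List Int) × Int) => r.2)) = (fun r => valB tree f r.2 (!false) == some v) from rfl]
              rw [hcongr]
              have : (r0 :: rt).find? (fun r => r.1.1 == M) = some best := by
                simpa [List.map_map] using hc2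
              rw [this]
              rfl
            rw [hfind]
            dsimp only
            have hbest_mem : best ∈ r0 :: rt :=
              PySem.List.min?_mem (min?_cons_pf (fun (r : (Int × List Int) × Int) => r.1.1) r0 rt)
            rw [(hIH best hbest_mem).2]
            simp [← hp]

-- the two fuelled recursions run out of fuel on exactly the same inputs
theorem valB_none_iff (tree : List (Int × List Int)) :
    ∀ (f : Nat) (n : Int) (mx : Bool), valB tree f n mx = none ↔ mmA tree f n mx = none := by
  intro f
  induction f with
  | zero => intro n mx; simp [valB, mmA]
  | succ f ih =>
    intro n mx
    rw [valB, mmA]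
    by_cases hcs : (PySem.Dict.mk tree).getD n [] = []
    · simp [hcs]
    · rw [if_neg hcs, if_neg hcs]
      have hiff : (optMap (fun c => valB tree f c (!mx)) ((PySem.Dict.mk tree).getD n []) = none)
          ↔ (optMap (fun ch => (mmA tree f ch (!mx)).map (fun r => (r, ch)))
              ((PySem.Dict.mk tree).getD n []) = none) := by
        rw [optMap_none_iff, optMap_none_iff]
        constructor
        · rintro ⟨c, hc, hv⟩
          exact ⟨c, hc, by rw [(ih c (!mx)).mp hv]; rfl⟩
        · rintro ⟨c, hc, hv⟩
          refine ⟨c, hc, (ih c (!mx)).mpr ?_⟩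
          cases hmm : mmA tree f c (!mx) with
          | none => rfl
          | some r => rw [hmm] at hv; simp at hv
      cases hA : optMap (fun ch => (mmA tree f ch (!mx)).map (fun r => (r, ch)))
          ((PySem.Dict.mk tree).getD n []) with
      | none =>
        simp [hiff.mpr hA]
      | some rs =>
        cases hB : optMap (fun c => valB tree f c (!mx)) ((PySem.Dict.mk tree).getD n []) with
        | none => rw [hA] at hiff; simp [hB] at hiff
        | some vs =>
          obtain ⟨hcs_eq, _⟩ := optMap_pair (fun ch => mmA tree f ch (!mx)) _ rs hA
          cases rs with
          | nil => simp [hcs_eq] at hcs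
          | cons r0 rt =>
            have hvs : vs ≠ [] := by
              intro hnil
              subst hnil
              cases hcsc : (PySem.Dict.mk tree).getD n [] with
              | nil => exact hcs hcsc
              | cons c ct =>
                rw [hcsc] at hB
                exact optMap_cons_ne_nil _ c ct hB
            cases vs with
            | nil => exact absurd rfl hvs
            | cons v0 vt =>
              cases mx with
              | true =>
                dsimp only
                rw [max?_cons_pf, max?_cons_pf]
                simp
              | false =>
                dsimp only
                rw [min?_cons_pf, min?_cons_pf]
                simp

-- ===== VERDICT (by name: the statement is the Claim_ definition above) =====
theorem minimax_path_spec : Claim_equal_minimax_path := by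
  intro tree node mx _ _
  unfold Spec_minimax_path minimax_path minimax_path_alt
  cases h : mmA tree (tree.length + 1) node mx with
  | none =>
    rw [(valB_none_iff tree (tree.length + 1) node mx).mpr h]
    rfl
  | some r =>
    obtain ⟨v, p⟩ := r
    obtain ⟨hv, hp⟩ := AtoB tree (tree.length + 1) node mx v p h
    rw [hv, hp]
    rfl
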